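-- pv_equiv track=rewrite | github.com/mmmdip/needleman_wunsch | NW.py | get_best_alignment
-- ===== SOURCE A (Python) =====
-- def get_best_alignment( alignedStrings, param ):
--     '''
--         calculates the best alignment from all the alignments based on the parameters passed
--     parameters:
--         alignedStrings (list of tuples): list containing the pair of aligned sequences
--         param (tuple): the scoring scheme with the points/values
--     returns:
--         bestAlignment (tuple): the best sequence alignment calculated
--         maxScore (int): the best alignment score
--     '''
--     scores = []
--     ( identity, transition, transversion, gap ) = param
--
--     for alignment in alignedStrings:
--         ( align1, align2 ) = alignment
--         score = 0
--         for idx in range( len( align1 ) ):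
--             char1 = align1[idx]
--             char2 = align2[idx]
--             if char1 == char2:
--                 # for match, identity point is added to score
--                 score += identity
--             elif ( char1 in [ 'A', 'G' ] and char2 in [ 'A', 'G' ] ) or ( char1 in [ 'C', 'T' ] and char2 in [ 'C', 'T' ] ):
--                 # for transition, transition penalty is deducted
--                 score += transition
--             elif char1 == '_' or char2 == '_':
--                 # for gap, gap penalty is deducted
--                 score += gap
--             else:
--                 # for transversion, transversion penalty is deducted
--                 score += transversion
--         scores.append( score )
--     ( bestAlignment, maxScore ) = ( alignedStrings[ scores.index( max( scores )) ], max( scores ) )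
--     return ( bestAlignment, maxScore )
-- ===== SOURCE B (Python) =====
-- def get_best_alignment(alignedStrings, param):
--     '''Single pass: score each alignment and keep the running best (strict > keeps first max).'''
--     identity, transition, transversion, gap = param
--     if not alignedStrings:
--         raise ValueError("no alignments to choose from")
--
--     def score(align1, align2):
--         s = 0
--         for char1, char2 in zip(align1, align2):
--             if char1 == char2:
--                 s += identity
--             elif (char1 in 'AG' and char2 in 'AG') or (char1 in 'CT' and char2 in 'CT'):
--                 s += transition
--             elif char1 == '_' or char2 == '_':
--                 s += gap
--             else:
--                 s += transversion
--         return s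
--
--     best = alignedStrings[0]
--     maxScore = score(best[0], best[1])
--     for alignment in alignedStrings[1:]:
--         sc = score(alignment[0], alignment[1])
--         if sc > maxScore:
--             best, maxScore = alignment, sc
--     return (best, maxScore)
-- ===== Notes on version B (the rewrite author's own statement) =====
-- stated objective: simpler
-- what changed: Drops the intermediate scores list plus max()/list.index() rescan: one pass over alignedStrings keeps a running (bestAlignment, maxScore), updating on strictly greater score; per-alignment scoring iterates zip(align1, align2) instead of indexing by range(len(align1)).
import Mathlib
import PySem

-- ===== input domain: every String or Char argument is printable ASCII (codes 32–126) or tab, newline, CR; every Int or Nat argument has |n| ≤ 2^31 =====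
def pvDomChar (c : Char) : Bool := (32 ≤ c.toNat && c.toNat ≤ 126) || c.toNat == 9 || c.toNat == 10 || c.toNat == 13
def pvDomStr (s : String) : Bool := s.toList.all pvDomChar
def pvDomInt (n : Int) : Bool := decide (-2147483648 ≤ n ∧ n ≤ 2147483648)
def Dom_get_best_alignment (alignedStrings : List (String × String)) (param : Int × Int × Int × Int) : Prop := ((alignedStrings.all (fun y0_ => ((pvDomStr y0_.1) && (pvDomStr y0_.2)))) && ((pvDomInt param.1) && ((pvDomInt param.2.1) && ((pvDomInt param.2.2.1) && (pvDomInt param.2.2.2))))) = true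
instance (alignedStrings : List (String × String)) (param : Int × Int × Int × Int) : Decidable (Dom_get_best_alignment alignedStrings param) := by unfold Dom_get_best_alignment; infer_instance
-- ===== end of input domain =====

-- ===== PORT A =====
-- B changes: one pass with a running best instead of a scores list + max()/index() rescans (objective: simpler).
-- Pre_ excludes inputs where A raises: empty list (max([]) ValueError) and pairs with len(align1) > len(align2) (IndexError).
-- score of one alignment, A's way: loop over range(len(align1)), indexing both strings.
-- align2[idx] raises IndexError when idx ≥ len(align2); such inputs are outside Pre_, so getD's default is never the value claimed about.
def pvScoreA (s1 s2 : List Char) (identity transition transversion gap : Int) : Int :=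
  (List.range s1.length).foldl (fun score idx =>
    let char1 := s1.getD idx ' '
    let char2 := s2.getD idx ' '
    if char1 = char2 then score + identity
    else if ((char1 = 'A' ∨ char1 = 'G') ∧ (char2 = 'A' ∨ char2 = 'G')) ∨
            ((char1 = 'C' ∨ char1 = 'T') ∧ (char2 = 'C' ∨ char2 = 'T')) then score + transition
    else if char1 = '_' ∨ char2 = '_' then score + gap
    else score + transversion) 0

def get_best_alignment (alignedStrings : List (String × String)) (param : Int × Int × Int × Int) : (String × String) × Int :=
  let identity := param.1; let transition := param.2.1
  let transversion := param.2.2.1; let gap := param.2.2.2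
  let scores := alignedStrings.foldl
    (fun acc alignment => acc ++ [pvScoreA alignment.1.toList alignment.2.toList identity transition transversion gap]) []
  -- max([]) raises ValueError on the empty list (outside Pre_); there the .getD defaults are never the value claimed about
  let maxScore := (PySem.List.max? scores (fun x => x)).getD 0
  let bestAlignment := alignedStrings.getD ((PySem.List.index? scores maxScore).getD 0) ("", "")
  (bestAlignment, maxScore)

-- ===== PORT B =====
-- score of one alignment, B's way: fold over zip(align1, align2).
def pvScoreB (s1 s2 : List Char) (param : Int × Int × Int × Int) : Int :=
  (s1.zip s2).foldl (fun s cd =>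
    if cd.1 = cd.2 then s + param.1
    else if ((cd.1 = 'A' ∨ cd.1 = 'G') ∧ (cd.2 = 'A' ∨ cd.2 = 'G')) ∨
            ((cd.1 = 'C' ∨ cd.1 = 'T') ∧ (cd.2 = 'C' ∨ cd.2 = 'T')) then s + param.2.1
    else if cd.1 = '_' ∨ cd.2 = '_' then s + param.2.2.2
    else s + param.2.2.1) 0

def get_best_alignment_alt (alignedStrings : List (String × String)) (param : Int × Int × Int × Int) : (String × String) × Int :=
  match alignedStrings with
  | [] => (("", ""), 0)  -- B raises ValueError here; outside Pre_
  | x :: rest =>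
    rest.foldl (fun acc alignment =>
      let sc := pvScoreB alignment.1.toList alignment.2.toList param
      if sc > acc.2 then (alignment, sc) else acc)
      (x, pvScoreB x.1.toList x.2.toList param)

-- ===== PRECONDITION & SPEC =====
-- Pre_ excludes exactly the inputs where A raises: the empty list (ValueError from max([]))
-- and any pair whose first string is longer than its second (IndexError from align2[idx]).
def Pre_get_best_alignment (alignedStrings : List (String × String)) (_param : Int × Int × Int × Int) : Prop :=
  alignedStrings ≠ [] ∧ ∀ p ∈ alignedStrings, p.1.toList.length ≤ p.2.toList.length
instance (alignedStrings : List (String × String)) (param : Int × Int × Int × Int) : Decidable (Pre_get_best_alignment alignedStrings param) := by unfold Pre_get_best_alignment; infer_instance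
def pvWitness_get_best_alignment : (List (String × String)) × (Int × Int × Int × Int) :=
  ([("AG", "AT"), ("A_", "AA")], (2, -1, -2, -3))
def Spec_get_best_alignment (alignedStrings : List (String × String)) (param : Int × Int × Int × Int) (out : (String × String) × Int) : Prop := out = get_best_alignment_alt alignedStrings param
instance (alignedStrings : List (String × String)) (param : Int × Int × Int × Int) (out : (String × String) × Int) : Decidable (Spec_get_best_alignment alignedStrings param out) := by unfold Spec_get_best_alignment; infer_instance

-- ===== CLAIM (what is proved, stated in full; the proofs are below) =====
def Claim_equal_get_best_alignment : Prop := ∀ (alignedStrings : List (String × String)) (param : Int × Int × Int × Int), Dom_get_best_alignment alignedStrings param → Pre_get_best_alignment alignedStrings param → Spec_get_best_alignment alignedStrings param (get_best_alignment alignedStrings param)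

-- ===== LEMMAS AND PROOFS =====

-- A's index loop over range(len(s1)) computes the same score as B's fold over zip, given len s1 ≤ len s2.
theorem pvScore_fold (p : Int × Int × Int × Int) :
    ∀ (s1 s2 : List Char) (acc : Int), s1.length ≤ s2.length →
    (List.range s1.length).foldl (fun score idx =>
      let char1 := s1.getD idx ' '
      let char2 := s2.getD idx ' '
      if char1 = char2 then score + p.1
      else if ((char1 = 'A' ∨ char1 = 'G') ∧ (char2 = 'A' ∨ char2 = 'G')) ∨
              ((char1 = 'C' ∨ char1 = 'T') ∧ (char2 = 'C' ∨ char2 = 'T')) then score + p.2.1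
      else if char1 = '_' ∨ char2 = '_' then score + p.2.2.2
      else score + p.2.2.1) acc
    = (s1.zip s2).foldl (fun s cd =>
      if cd.1 = cd.2 then s + p.1
      else if ((cd.1 = 'A' ∨ cd.1 = 'G') ∧ (cd.2 = 'A' ∨ cd.2 = 'G')) ∨
              ((cd.1 = 'C' ∨ cd.1 = 'T') ∧ (cd.2 = 'C' ∨ cd.2 = 'T')) then s + p.2.1
      else if cd.1 = '_' ∨ cd.2 = '_' then s + p.2.2.2
      else s + p.2.2.1) acc := by
  intro s1
  induction s1 with
  | nil => intro s2 acc h; simp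
  | cons c s1 ih =>
    intro s2 acc h
    cases s2 with
    | nil => simp at h
    | cons d s2 =>
      simp only [List.length_cons]
      rw [List.range_succ_eq_map]
      simp only [List.foldl_cons, List.foldl_map, List.getD_cons_succ, List.getD_cons_zero,
        List.zip_cons_cons]
      exact ih s2 _ (by simpa using h)

theorem pvScore_eq (s1 s2 : List Char) (p : Int × Int × Int × Int)
    (h : s1.length ≤ s2.length) :
    pvScoreA s1 s2 p.1 p.2.1 p.2.2.1 p.2.2.2 = pvScoreB s1 s2 p := by
  unfold pvScoreA pvScoreB
  exact pvScore_fold p s1 s2 0 h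

theorem pvFoldl_concat {α β : Type} (g : α → β) :
    ∀ (xs : List α) (acc : List β), xs.foldl (fun acc a => acc ++ [g a]) acc = acc ++ xs.map g := by
  intro xs
  induction xs with
  | nil => intro acc; simp
  | cons x xs ih => intro acc; simp [ih]

-- A's "index of the max score" selection equals B's running-best fold (first max wins in both).
theorem pvSel (f : (String × String) → Int) :
    ∀ (t : List (String × String)) (c : String × String),
    ((c :: t).getD ((PySem.List.index? (f c :: t.map f)
        ((PySem.List.max? (f c :: t.map f) (fun x => x)).getD 0)).getD 0) ("", ""),
     (PySem.List.max? (f c :: t.map f) (fun x => x)).getD 0)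
    = t.foldl (fun acc al => if f al > acc.2 then (al, f al) else acc) (c, f c) := by
  intro t
  induction t with
  | nil =>
    intro c
    simp [PySem.List.max?_id_cons]
  | cons x t ih =>
    intro c
    set c' : String × String := if f x > f c then x else c with hc'
    have hmax : max (f c) (f x) = f c' := by
      by_cases h : f x > f c
      · simp [hc', h, max_eq_right (le_of_lt h)]
      · simp [hc', h, max_eq_left (le_of_not_gt h)]
    have hstep : (if f x > (c, f c).2 then (x, f x) else (c, f c)) = (c', f c') := by
      by_cases h : f x > f c
      · simp [hc', h]
      · simp [hc', h]
    have hrhs : (x :: t).foldl (fun acc al => if f al > acc.2 then (al, f al) else acc) (c, f c)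
        = t.foldl (fun acc al => if f al > acc.2 then (al, f al) else acc) (c', f c') := by
      simp only [List.foldl_cons]; rw [hstep]
    simp only [List.map_cons]
    rw [PySem.List.max?_id_cons, Option.getD_some]
    have hM : List.foldl max (f c) (f x :: List.map f t) = List.foldl max (f c') (List.map f t) := by
      rw [List.foldl_cons, hmax]
    rw [hM, hrhs, ← ih c', PySem.List.max?_id_cons, Option.getD_some]
    set m : Int := List.foldl max (f c') (List.map f t) with hmdef
    have hc'le : f c' ≤ m := hmdef ▸ (PySem.List.le_foldl_max (List.map f t) (f c')).1
    by_cases hx : f x > f c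
    · -- c' = x: the head score f c is strictly below m, so A skips it
      have hcx : c' = x := by simp [hc', hx]
      have hcne : f c ≠ m := ne_of_lt (lt_of_lt_of_le hx (hcx ▸ hc'le))
      have hmem : m ∈ f x :: List.map f t := by
        rcases hmdef ▸ PySem.List.foldl_max_mem (List.map f t) (f c') with h | h
        · exact h ▸ (hcx ▸ List.mem_cons_self)
        · exact List.mem_cons_of_mem _ h
      rw [PySem.List.index?_cons_of_ne _ hcne, hcx]
      cases hjv : PySem.List.index? (f x :: List.map f t) m with
      | none =>
        have hs := (PySem.List.index?_isSome_iff (f x :: List.map f t) m).2 hmem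
        rw [hjv] at hs; exact absurd hs (by simp)
      | some j => simp
    · -- c' = c
      have hcc : c' = c := by simp [hc', hx]
      rw [hcc]
      by_cases hceq : f c = m
      · -- the max sits at the head: index 0 on both sides
        have h1 : PySem.List.index? (f c :: f x :: List.map f t) m = some 0 := by
          rw [← hceq]; exact PySem.List.index?_cons_self _ _
        have h2 : PySem.List.index? (f c :: List.map f t) m = some 0 := by
          rw [← hceq]; exact PySem.List.index?_cons_self _ _
        rw [h1, h2]; simp
      · have hclt : f c < m := lt_of_le_of_ne (hcc ▸ hc'le) hceq
        have hxne : f x ≠ m := ne_of_lt (lt_of_le_of_lt (le_of_not_gt hx) hclt)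
        have hmem : m ∈ List.map f t := by
          rcases hmdef ▸ PySem.List.foldl_max_mem (List.map f t) (f c') with h | h
          · exact absurd (hcc ▸ h.symm) hceq
          · exact h
        rw [PySem.List.index?_cons_of_ne _ hceq, PySem.List.index?_cons_of_ne _ hxne,
          PySem.List.index?_cons_of_ne _ hceq]
        cases hjv : PySem.List.index? (List.map f t) m with
        | none =>
        have hs := (PySem.List.index?_isSome_iff (List.map f t) m).2 hmem
        rw [hjv] at hs; exact absurd hs (by simp)
        | some j => simp

-- ===== VERDICT (by name: the statement is the Claim_ definition above) =====
theorem get_best_alignment_spec : Claim_equal_get_best_alignment := by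
  intro alignedStrings param _hdom hpre
  obtain ⟨hne, hlen⟩ := hpre
  unfold Spec_get_best_alignment get_best_alignment get_best_alignment_alt
  cases alignedStrings with
  | nil => exact absurd rfl hne
  | cons x rest =>
    simp only []
    rw [pvFoldl_concat]
    have hmap : (x :: rest).map (fun al => pvScoreA al.1.toList al.2.toList param.1 param.2.1 param.2.2.1 param.2.2.2)
        = (x :: rest).map (fun al => pvScoreB al.1.toList al.2.toList param) := by
      apply List.map_congr_left
      intro a ha
      exact pvScore_eq _ _ _ (hlen a ha)
    simp only [List.nil_append, hmap]
    have := pvSel (fun al => pvScoreB al.1.toList al.2.toList param) rest x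
    simpa using this
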